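-- pv_equiv track=rewrite | github.com/lum1n0us/opencode_configuration_xkm | skill/analyze-pr/scripts/analyze_pr.py | format_detailed_classification
-- ===== SOURCE A (Python) =====
-- from collections import defaultdict
--
-- def format_detailed_classification(file_classifications):
--     """Format the detailed file classification section"""
--     if not file_classifications:
--         return "No files to classify."
--
--     # Group files by classification
--     classification_groups = defaultdict(list)
--
--     for file_path, classifications in file_classifications.items():
--         for category in classifications:
--             classification_groups[category].append(file_path)
--
--     detailed_lines = []
--
--     for category, files in sorted(classification_groups.items()):
--         category_name = category.replace("_", " ").title()
--         detailed_lines.append(f"#### {category_name}")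
--         for file_path in sorted(files):
--             detailed_lines.append(f"- `{file_path}`")
--         detailed_lines.append("")
--
--     return "\n".join(detailed_lines)
-- ===== SOURCE B (Python) =====
-- def format_detailed_classification(file_classifications):
--     """Format the detailed file classification section"""
--     if not file_classifications:
--         return "No files to classify."
--
--     # One flat list of (category, file) pairs; two stable sorts give the
--     # global (category, file) order, then a single grouping scan emits the lines.
--     pairs = [(c, f) for f, cs in file_classifications.items() for c in cs]
--     pairs = sorted(pairs, key=lambda p: p[1])  # by file (stable)
--     pairs = sorted(pairs, key=lambda p: p[0])  # then by category
--
--     lines = []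
--     i, n = 0, len(pairs)
--     while i < n:
--         cat = pairs[i][0]
--         lines.append("#### " + cat.replace("_", " ").title())
--         while i < n and pairs[i][0] == cat:
--             lines.append("- `" + pairs[i][1] + "`")
--             i += 1
--         lines.append("")
--     return "\n".join(lines)
-- ===== Notes on version B (the rewrite author's own statement) =====
-- stated objective: alternative
-- what changed: B replaces A's defaultdict-of-buckets with per-bucket sorts by one flat (category, file) pair list put into global order by two stable sorts (by file, then by category) and a single groupby-style scan that emits a header whenever the category of the current run changes.
import Mathlib
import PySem

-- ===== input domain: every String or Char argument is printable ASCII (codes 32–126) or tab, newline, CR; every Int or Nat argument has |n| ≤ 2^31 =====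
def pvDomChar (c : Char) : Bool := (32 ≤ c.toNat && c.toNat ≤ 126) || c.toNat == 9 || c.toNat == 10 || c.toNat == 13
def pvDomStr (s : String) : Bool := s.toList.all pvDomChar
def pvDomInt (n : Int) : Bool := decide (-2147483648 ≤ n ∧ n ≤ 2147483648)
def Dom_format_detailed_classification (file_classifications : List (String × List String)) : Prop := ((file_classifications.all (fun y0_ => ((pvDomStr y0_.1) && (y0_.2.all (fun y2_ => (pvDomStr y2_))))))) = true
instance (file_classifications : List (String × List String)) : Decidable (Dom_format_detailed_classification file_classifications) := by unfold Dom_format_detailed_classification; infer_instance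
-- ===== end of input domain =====

-- B replaces A's defaultdict-of-buckets (with a sort per bucket) by one flat (category, file)
-- pair list, two stable sorts giving the global (category, file) order, and a single
-- groupby-style scan emitting a header at each category change (objective: alternative).

-- str.title() over ASCII (shared by both ports): a letter is uppercased iff the previous
-- character is not a letter (exact for the printable-ASCII domain, where cased = alphabetic).
def pyTitleChars : Bool → List Char → List Char
  | _, [] => []
  | prev, c :: rest =>
      (if PySem.Chars.isalpha c then
        (if prev then PySem.Chars.lowerChar c else PySem.Chars.upperChar c) else c)
        :: pyTitleChars (PySem.Chars.isalpha c) rest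

def pyTitle (s : String) : String := String.ofList (pyTitleChars false s.toList)

-- ===== PORT A =====
def format_detailed_classification (file_classifications : List (String × List String)) : String :=
  if file_classifications = [] then "No files to classify."
  else
    let groups : PySem.Dict String (List String) :=
      file_classifications.foldl
        (fun d fp => fp.2.foldl (fun d category => d.modify category [] (fun l => l ++ [fp.1])) d)
        PySem.Dict.empty
    -- Python sorts the (key, value) tuples; dict keys are unique, so the value component is never
    -- compared: sorting by the key alone is exact here.
    let detailed_lines :=
      (PySem.List.sorted groups.items (fun p => p.1)).foldl
        (fun acc cf =>
          ((acc ++ ["#### " ++ pyTitle (PySem.Str.replace cf.1 "_" " ")])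
            ++ (PySem.List.sorted cf.2 (fun f => f)).map (fun f => "- `" ++ f ++ "`"))
          ++ [""])
        []
    PySem.Str.join "\n" detailed_lines

-- ===== PORT B =====
-- the outer while loop of Source B: one recursive step per category run of the globally sorted
-- pair list; the inner while (bullets of the run) is the head bullet plus the takeWhile run.
def emitGroups : List (String × String) → List String
  | [] => []
  | p :: rest =>
      ("#### " ++ pyTitle (PySem.Str.replace p.1 "_" " ")) ::
        (("- `" ++ p.2 ++ "`") ::
          ((rest.takeWhile (fun q => q.1 == p.1)).map (fun q => "- `" ++ q.2 ++ "`") ++ [""]))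
        ++ emitGroups (rest.dropWhile (fun q => q.1 == p.1))
termination_by l => l.length
decreasing_by
  simp only [List.length_cons]
  exact Nat.lt_succ_of_le (List.length_dropWhile_le _ _)

def format_detailed_classification_alt (file_classifications : List (String × List String)) : String :=
  if file_classifications = [] then "No files to classify."
  else
    let pairs := file_classifications.flatMap (fun fp => fp.2.map (fun c => (c, fp.1)))
    let pairs1 := PySem.List.sorted pairs (fun p => p.2)      -- stable sort by file
    let sp := PySem.List.sorted pairs1 (fun p => p.1)         -- then by category
    PySem.Str.join "\n" (emitGroups sp)

-- ===== PRECONDITION & SPEC =====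
def Spec_format_detailed_classification (file_classifications : List (String × List String)) (out : String) : Prop := out = format_detailed_classification_alt file_classifications
instance (file_classifications : List (String × List String)) (out : String) : Decidable (Spec_format_detailed_classification file_classifications out) := by unfold Spec_format_detailed_classification; infer_instance

-- ===== CLAIM (what is proved, stated in full; the proofs are below) =====
def Claim_equal_format_detailed_classification : Prop := ∀ (file_classifications : List (String × List String)), Dom_format_detailed_classification file_classifications → Spec_format_detailed_classification file_classifications (format_detailed_classification file_classifications)

-- ===== LEMMAS AND PROOFS =====

-- the flat pair list B builds
def pvPairs (file_classifications : List (String × List String)) : List (String × String) :=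
  file_classifications.flatMap (fun fp => fp.2.map (fun c => (c, fp.1)))

-- the sorted list of distinct categories of a pair list
def pvCats (l : List (String × String)) : List String :=
  PySem.List.sorted (PySem.Set.ofList (l.map (fun p => p.1))) (fun c => c)

-- A's nested grouping loop is the flat fold over the pair list
theorem pv_groups_eq (L : List (String × List String)) (d0 : PySem.Dict String (List String)) :
    L.foldl (fun d fp => fp.2.foldl (fun d category => d.modify category [] (fun l => l ++ [fp.1])) d) d0
      = (pvPairs L).foldl (fun d p => d.modify p.1 [] (fun l => l ++ [p.2])) d0 := by
  induction L generalizing d0 with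
  | nil => rfl
  | cons fp rest ih =>
      simp only [pvPairs, List.foldl_cons, List.flatMap_cons, List.foldl_append, List.foldl_map]
      exact ih _

-- A's three-way-append accumulation, flattened
theorem pv_foldA (f : String × List String → String) (g : String × List String → List String)
    (l : List (String × List String)) (a : List String) :
    l.foldl (fun acc cf => ((acc ++ [f cf]) ++ g cf) ++ [""]) a
      = a ++ l.flatMap (fun cf => f cf :: (g cf ++ [""])) := by
  induction l generalizing a with
  | nil => simp
  | cons x t ih => simp [List.append_assoc, List.flatMap]

-- insertBy walks past elements it is not "before"
theorem pv_insertBy_skip {α : Type} (before : α → α → Bool) (x : α) (A B : List α)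
    (h : ∀ y ∈ A, before x y = false) :
    PySem.List.insertBy before x (A ++ B) = A ++ PySem.List.insertBy before x B := by
  induction A with
  | nil => rfl
  | cons a A ih =>
      simp only [List.cons_append, PySem.List.insertBy, h a (by simp)]
      simp only [Bool.false_eq_true, if_false, List.cons_inj_right]
      exact ih (fun y hy => h y (by simp [hy]))

-- insertBy lands at the front when it is "before" everything
theorem pv_insertBy_front {α : Type} (before : α → α → Bool) (x : α) (B : List α)
    (h : ∀ y ∈ B, before x y = true) :
    PySem.List.insertBy before x B = x :: B := by
  cases B with
  | nil => rfl
  | cons b t => simp [PySem.List.insertBy, h b (by simp)]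

-- insertBy is a permutation of consing
theorem pv_insertBy_perm {α : Type} (before : α → α → Bool) (x : α) (l : List α) :
    (PySem.List.insertBy before x l).Perm (x :: l) := by
  induction l with
  | nil => exact List.Perm.refl _
  | cons y t ih =>
      simp only [PySem.List.insertBy]
      split
      · exact List.Perm.refl _
      · exact (ih.cons y).trans (List.Perm.swap x y t)

-- inserting a new key into a strictly increasing list keeps it strictly increasing
theorem pv_insertBy_pairwise_lt (cs : List String) (a : String)
    (h : cs.Pairwise (· < ·)) (hna : a ∉ cs) :
    (PySem.List.insertBy (fun b c => decide (b < c)) a cs).Pairwise (· < ·) := by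
  induction cs with
  | nil => simp [PySem.List.insertBy]
  | cons c cs ih =>
      rcases List.pairwise_cons.mp h with ⟨hc, hcs⟩
      simp only [PySem.List.insertBy]
      split
      · rename_i hlt
        refine List.pairwise_cons.mpr ⟨?_, h⟩
        intro b hb
        rcases List.mem_cons.mp hb with rfl | hb
        · exact of_decide_eq_true hlt
        · exact lt_trans (of_decide_eq_true hlt) (hc b hb)
      · rename_i hnlt
        have hca : c < a := by
          rcases lt_or_ge c a with h1 | h1
          · exact h1
          · exfalso
            rcases eq_or_lt_of_le h1 with h2 | h2
            · exact hna (by simp [← h2])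
            · exact hnlt (by simpa using h2)
        refine List.pairwise_cons.mpr ⟨?_, ih hcs (fun hm => hna (by simp [hm]))⟩
        intro b hb
        rcases (PySem.List.mem_insertBy _ _ _ _).mp hb with rfl | hb
        · exact hca
        · exact hc b hb
  
-- every element of a grouped-by-filter list has its key in the group list
theorem pv_mem_grouped (cs : List String) (l : List (String × String))
    (p : String × String) (hp : p ∈ cs.flatMap (fun c => l.filter (fun q => q.1 == c))) :
    p.1 ∈ cs := by
  rcases List.mem_flatMap.mp hp with ⟨c, hc, hpc⟩
  rcases List.mem_filter.mp hpc with ⟨_, he⟩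
  rename_i inst
  have : p.1 = c := by simpa using he
  rw [this]; exact hc

-- appending x to l extends exactly the x.1 block of the filters
theorem pv_filter_append (l : List (String × String)) (x : String × String) (c : String) :
    (l ++ [x]).filter (fun q => q.1 == c) =
      l.filter (fun q => q.1 == c) ++ (if x.1 = c then [x] else []) := by
  rw [List.filter_append]
  by_cases h : x.1 = c
  · simp [List.filter, h]
  · have hb : (x.1 == c) = false := beq_eq_false_iff_ne.mpr h
    simp [List.filter, hb, h]

-- inserting a pair whose key is already a group: it lands at the end of its block
theorem pv_insert_grouped_mem (cs : List String) (l : List (String × String))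
    (x : String × String) (h : cs.Pairwise (· < ·)) (hx : x.1 ∈ cs) :
    PySem.List.insertBy (fun a b => decide (a.1 < b.1)) x
        (cs.flatMap (fun c => l.filter (fun q => q.1 == c)))
      = cs.flatMap (fun c => (l ++ [x]).filter (fun q => q.1 == c)) := by
  induction cs with
  | nil => cases hx
  | cons c cs ih =>
      rcases List.pairwise_cons.mp h with ⟨hc, hcs⟩
      simp only [List.flatMap_cons]
      by_cases hxc : x.1 = c
      · -- x belongs to the head block: skip the block, then insert in front of the rest
        have hx_not_cs : x.1 ∉ cs := fun hm => absurd (hc _ hm) (by rw [hxc]; exact lt_irrefl c)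
        rw [pv_insertBy_skip _ _ _ _ (fun y hy => by
          rcases List.mem_filter.mp hy with ⟨_, he⟩
          have : y.1 = c := by simpa using he
          simp [this, hxc])]
        rw [pv_insertBy_front _ _ _ (fun y hy => by
          have hy1 := pv_mem_grouped cs l y hy
          have : x.1 < y.1 := by rw [hxc]; exact hc _ hy1
          simpa using this)]
        rw [pv_filter_append l x c, if_pos hxc]
        have htail : cs.flatMap (fun c' => (l ++ [x]).filter (fun q => q.1 == c'))
            = cs.flatMap (fun c' => l.filter (fun q => q.1 == c')) :=
          List.flatMap_congr (fun c' hc' => by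
            have hne : x.1 ≠ c' := fun he => hx_not_cs (by rw [he]; exact hc')
            rw [pv_filter_append l x c', if_neg hne, List.append_nil])
        rw [htail]
        simp
      · -- x belongs to a later block: skip the head block, recurse
        have hx_cs : x.1 ∈ cs := by rcases List.mem_cons.mp hx with h1 | h1; exact absurd h1 hxc; exact h1
        rw [pv_insertBy_skip _ _ _ _ (fun y hy => by
          rcases List.mem_filter.mp hy with ⟨_, he⟩
          have hy1 : y.1 = c := by simpa using he
          have : ¬ x.1 < y.1 := by rw [hy1]; exact not_lt_of_gt (hc _ hx_cs)
          simpa using this)]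
        rw [ih hcs hx_cs, pv_filter_append l x c, if_neg hxc, List.append_nil]

-- inserting a pair with a brand-new key: a new singleton block appears in key position
theorem pv_insert_grouped_new (cs : List String) (l : List (String × String))
    (x : String × String) (h : cs.Pairwise (· < ·)) (hx : x.1 ∉ cs)
    (hl : l.filter (fun q => q.1 == x.1) = []) :
    PySem.List.insertBy (fun a b => decide (a.1 < b.1)) x
        (cs.flatMap (fun c => l.filter (fun q => q.1 == c)))
      = (PySem.List.insertBy (fun a b => decide (a < b)) x.1 cs).flatMap
          (fun c => (l ++ [x]).filter (fun q => q.1 == c)) := by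
  induction cs with
  | nil =>
      simp only [List.flatMap_nil, PySem.List.insertBy, List.flatMap_cons, List.flatMap_nil]
      rw [pv_filter_append l x x.1, if_pos rfl, hl]
      simp
  | cons c cs ih =>
      rcases List.pairwise_cons.mp h with ⟨hc, hcs⟩
      have hxc : x.1 ≠ c := fun he => hx (by simp [he])
      simp only [List.flatMap_cons]
      by_cases hlt : x.1 < c
      · -- new block goes in front of everything
        rw [pv_insertBy_front _ _ _ (fun y hy => by
          have hy1 : y.1 = c ∨ y.1 ∈ cs := by
            rcases List.mem_append.mp hy with h1 | h1
            · exact Or.inl (by simpa using (List.mem_filter.mp h1).2)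
            · exact Or.inr (pv_mem_grouped cs l y h1)
          have : x.1 < y.1 := by
            rcases hy1 with h1 | h1
            · rw [h1]; exact hlt
            · rw [show y.1 = y.1 from rfl]; exact lt_trans hlt (hc _ h1)
          simpa using this)]
        have hins : PySem.List.insertBy (fun a b => decide (a < b)) x.1 (c :: cs) = x.1 :: c :: cs := by
          simp [PySem.List.insertBy, hlt]
        rw [hins]
        simp only [List.flatMap_cons]
        rw [pv_filter_append l x x.1, if_pos rfl, hl,
            pv_filter_append l x c, if_neg hxc, List.append_nil]
        have htail : cs.flatMap (fun c' => (l ++ [x]).filter (fun q => q.1 == c'))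
            = cs.flatMap (fun c' => l.filter (fun q => q.1 == c')) :=
          List.flatMap_congr (fun c' hc' => by
            have hne : x.1 ≠ c' := fun he => absurd (hc _ hc') (not_lt_of_gt (by rw [← he]; exact hlt))
            rw [pv_filter_append l x c', if_neg hne, List.append_nil])
        rw [htail]
        simp
      · -- skip the head block, recurse
        rw [pv_insertBy_skip _ _ _ _ (fun y hy => by
          rcases List.mem_filter.mp hy with ⟨_, he⟩
          have hy1 : y.1 = c := by simpa using he
          have : ¬ x.1 < y.1 := by rw [hy1]; exact hlt
          simpa using this)]
        have hins : PySem.List.insertBy (fun a b => decide (a < b)) x.1 (c :: cs)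
            = c :: PySem.List.insertBy (fun a b => decide (a < b)) x.1 cs := by
          simp [PySem.List.insertBy, hlt]
        rw [ih hcs (fun hm => hx (by simp [hm])), hins]
        simp only [List.flatMap_cons]
        rw [pv_filter_append l x c, if_neg hxc, List.append_nil]

-- Set.ofList over an appended element is Set.add
theorem pv_ofList_append (A : List String) (c : String) :
    PySem.Set.ofList (A ++ [c]) = PySem.Set.add (PySem.Set.ofList A) c := by
  rw [PySem.Set.ofList_eq_foldl, PySem.Set.ofList_eq_foldl, List.foldl_append]
  rfl

-- STABLE-SORT GROUPING: sorting pairs by first component is the concatenation, in sorted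
-- category order, of the (order-preserving) filters of each category.
theorem pv_sorted_fst_grouped (l : List (String × String)) :
    PySem.List.sorted l (fun p => p.1)
      = (pvCats l).flatMap (fun c => l.filter (fun q => q.1 == c)) := by
  induction l using List.reverseRecOn with
  | nil => rfl
  | append_singleton l x ih =>
      rw [PySem.List.sorted_eq_foldl_insertBy, List.foldl_append, ← PySem.List.sorted_eq_foldl_insertBy]
      simp only [List.foldl_cons, List.foldl_nil]
      rw [ih]
      have hpw : (pvCats l).Pairwise (· < ·) := PySem.List.sorted_ofList_pairwise_lt _
      have hmem_cats : x.1 ∈ pvCats l ↔ x.1 ∈ l.map (fun p => p.1) := by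
        unfold pvCats
        rw [PySem.List.mem_sorted, PySem.Set.mem_ofList]
      by_cases hx : x.1 ∈ pvCats l
      · rw [pv_insert_grouped_mem _ _ _ hpw hx]
        have hcats : pvCats (l ++ [x]) = pvCats l := by
          unfold pvCats
          rw [List.map_append]
          show PySem.List.sorted (PySem.Set.ofList (l.map (fun p => p.1) ++ [x.1])) _ = _
          rw [pv_ofList_append]
          have hmem : x.1 ∈ PySem.Set.ofList (l.map (fun p => p.1)) := by
            rw [PySem.Set.mem_ofList]; exact hmem_cats.mp hx
          have hcon : PySem.Set.contains (PySem.Set.ofList (l.map (fun p => p.1))) x.1 = true :=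
            List.elem_eq_true_of_mem hmem
          have hadd : PySem.Set.add (PySem.Set.ofList (l.map (fun p => p.1))) x.1
              = PySem.Set.ofList (l.map (fun p => p.1)) := by
            unfold PySem.Set.add
            rw [hcon]
            simp
          rw [hadd]
        rw [hcats]
      · have hlf : l.filter (fun q => q.1 == x.1) = [] := by
          rw [List.filter_eq_nil_iff]
          intro p hp hpe
          exact hx (hmem_cats.mpr (by
            have : p.1 = x.1 := by simpa using hpe
            exact this ▸ List.mem_map_of_mem hp))
        rw [pv_insert_grouped_new _ _ _ hpw hx hlf]
        have hcats : pvCats (l ++ [x])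
            = PySem.List.insertBy (fun a b => decide (a < b)) x.1 (pvCats l) := by
          unfold pvCats
          rw [List.map_append]
          show PySem.List.sorted (PySem.Set.ofList (l.map (fun p => p.1) ++ [x.1])) _ = _
          rw [pv_ofList_append]
          have hnm : x.1 ∉ PySem.Set.ofList (l.map (fun p => p.1)) := by
            rw [PySem.Set.mem_ofList]; exact fun hm => hx (hmem_cats.mpr hm)
          have hcon : PySem.Set.contains (PySem.Set.ofList (l.map (fun p => p.1))) x.1 = false := by
            cases hcc : PySem.Set.contains (PySem.Set.ofList (l.map (fun p => p.1))) x.1 with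
            | false => rfl
            | true =>
                exact absurd (List.mem_of_elem_eq_true hcc) hnm
          have hadd : PySem.Set.add (PySem.Set.ofList (l.map (fun p => p.1))) x.1
              = PySem.Set.ofList (l.map (fun p => p.1)) ++ [x.1] := by
            unfold PySem.Set.add
            rw [hcon]
            simp
          rw [hadd]
          apply PySem.List.sorted_eq_of_perm_of_pairwise_lt
          · exact ((pv_insertBy_perm _ _ _).trans
              (((PySem.List.sorted_perm _ _ _).cons x.1).trans (List.perm_append_singleton _ _).symm))
          · exact pv_insertBy_pairwise_lt _ _ (PySem.List.sorted_ofList_pairwise_lt _) hx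
        rw [hcats]

-- GROUPING SCAN: on a list laid out as contiguous nonempty blocks of strictly increasing
-- category, emitGroups produces exactly one header + bullets + blank line per block.
theorem pv_scan (cs : List String) (F : String → List (String × String))
    (h : cs.Pairwise (· < ·)) (hne : ∀ c ∈ cs, F c ≠ [])
    (hkey : ∀ c ∈ cs, ∀ p ∈ F c, p.1 = c) :
    emitGroups (cs.flatMap F)
      = cs.flatMap (fun c =>
          ("#### " ++ pyTitle (PySem.Str.replace c "_" " ")) ::
            ((F c).map (fun q => "- `" ++ q.2 ++ "`") ++ [""])) := by
  induction cs with
  | nil => simp [emitGroups]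
  | cons c cs ih =>
      rcases List.pairwise_cons.mp h with ⟨hc, hcs⟩
      obtain ⟨q, qt, hq⟩ : ∃ q qt, F c = q :: qt := by
        cases hFc : F c with
        | nil => exact absurd hFc (hne c (by simp))
        | cons q qt => exact ⟨q, qt, rfl⟩
      have hq1 : q.1 = c := hkey c (by simp) q (by simp [hq])
      have hqt : ∀ p ∈ qt, p.1 = c := fun p hp => hkey c (by simp) p (by simp [hq, hp])
      have hrest : ∀ p ∈ cs.flatMap F, p.1 ≠ c := by
        intro p hp
        rcases List.mem_flatMap.mp hp with ⟨c', hc', hpc'⟩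
        rw [hkey c' (by simp [hc']) p hpc']
        exact fun he => absurd (hc _ hc') (by rw [he]; exact lt_irrefl c)
      simp only [List.flatMap_cons, hq, List.cons_append]
      rw [emitGroups]
      have htake : (qt ++ cs.flatMap F).takeWhile (fun r => r.1 == q.1) = qt := by
        rw [List.takeWhile_append_of_pos (fun a ha => by simp [hqt a ha, hq1])]
        have : (cs.flatMap F).takeWhile (fun r => r.1 == q.1) = [] := by
          cases hfm : cs.flatMap F with
          | nil => rfl
          | cons r t =>
              have : r.1 ≠ c := hrest r (by simp [hfm])
              simp [hq1, this]
        rw [this, List.append_nil]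
      have hdrop : (qt ++ cs.flatMap F).dropWhile (fun r => r.1 == q.1) = cs.flatMap F := by
        rw [List.dropWhile_append_of_pos (fun a ha => by simp [hqt a ha, hq1])]
        cases hfm : cs.flatMap F with
        | nil => rfl
        | cons r t =>
            have : r.1 ≠ c := hrest r (by simp [hfm])
            simp [hq1, this]
      rw [htake, hdrop, ih hcs (fun c' h' => hne c' (by simp [h'])) (fun c' h' => hkey c' (by simp [h'])), hq1]
      simp

-- ===== VERDICT (by name: the statement is the Claim_ definition above) =====
theorem format_detailed_classification_spec : Claim_equal_format_detailed_classification := by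
  intro fc _
  unfold Spec_format_detailed_classification
  by_cases hfc : fc = []
  · simp [format_detailed_classification, format_detailed_classification_alt, hfc]
  · simp only [format_detailed_classification, format_detailed_classification_alt, if_neg hfc]
    rw [pv_groups_eq fc PySem.Dict.empty]
    rw [show (fc.flatMap (fun fp => fp.2.map (fun c => (c, fp.1)))) = pvPairs fc from rfl]
    set pairs := pvPairs fc with hpairs
    set l' := PySem.List.sorted pairs (fun p => p.2) with hl'
    set groups := pairs.foldl (fun d p => d.modify p.1 [] (fun l => l ++ [p.2])) PySem.Dict.empty
      with hgroups
    -- A side: items sorted by key = map over the sorted distinct categories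
    have hnodup : groups.keys.Nodup := by
      rw [hgroups]
      exact PySem.Dict.nodup_keys_foldl_modify_key pairs (fun p => p.1) []
        (fun d p => fun l => l ++ [p.2]) PySem.Dict.empty PySem.Dict.nodup_keys_empty
    have hkeys : groups.keys = PySem.Set.ofList (pairs.map (fun p => p.1)) := by
      rw [hgroups]
      rw [PySem.Dict.keys_foldl_modify_key pairs (fun p => p.1) []
        (fun d p => fun l => l ++ [p.2]) PySem.Dict.empty]
      simp [PySem.Set.ofList, PySem.Set.update, PySem.Dict.keys_empty]
    have hgetD : ∀ c, groups.getD c [] = (pairs.filter (fun p => p.1 == c)).map (fun p => p.2) := by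
      intro c
      rw [hgroups, PySem.Dict.getD_foldl_modify_append pairs PySem.Dict.empty c]
      simp
    have hitems : PySem.List.sorted groups.items (fun p => p.1)
        = (pvCats pairs).map (fun k => (k, groups.getD k [])) := by
      apply PySem.List.sorted_eq_of_perm_of_pairwise_lt
      · have h1 : (pvCats pairs).Perm groups.keys := by
          rw [hkeys]; exact PySem.List.sorted_perm _ _ _
        have h2 := h1.map (fun k => (k, groups.getD k []))
        rw [← PySem.Dict.items_eq_map_keys groups hnodup []] at h2
        exact h2
      · rw [List.pairwise_map]
        exact PySem.List.sorted_ofList_pairwise_lt _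
    rw [hitems]
    rw [pv_foldA (fun cf => "#### " ++ pyTitle (PySem.Str.replace cf.1 "_" " "))
          (fun cf => (PySem.List.sorted cf.2 (fun f => f)).map (fun f => "- `" ++ f ++ "`"))]
    simp only [List.flatMap_map, List.nil_append]
    -- B side: stable-sort grouping + the scan
    rw [pv_sorted_fst_grouped l']
    have hperm : l'.Perm pairs := PySem.List.sorted_perm _ _ _
    have hcats : pvCats l' = pvCats pairs := by
      unfold pvCats
      apply PySem.List.sorted_eq_sorted_of_perm _ _ _ (fun a b h => h)
      rw [List.perm_ext_iff_of_nodup (PySem.Set.nodup_ofList _) (PySem.Set.nodup_ofList _)]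
      intro a
      rw [PySem.Set.mem_ofList, PySem.Set.mem_ofList]
      exact ⟨fun h => (hperm.map (fun p => p.1)).mem_iff.mp h,
             fun h => (hperm.map (fun p => p.1)).mem_iff.mpr h⟩
    rw [hcats]
    rw [pv_scan (pvCats pairs) (fun c => l'.filter (fun q => q.1 == c))
          (PySem.List.sorted_ofList_pairwise_lt _)
          (fun c hcm => by
            rw [Ne, List.filter_eq_nil_iff]
            intro hall
            have hcm' : c ∈ pairs.map (fun p => p.1) := by
              have := (PySem.List.mem_sorted _ _ _ _).mp hcm
              rwa [PySem.Set.mem_ofList] at this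
            rcases List.mem_map.mp hcm' with ⟨p, hp, hpe⟩
            have hp' : p ∈ l' := (PySem.List.mem_sorted _ _ _ _).mpr hp
            exact hall p hp' (by simp [hpe]))
          (fun c _ p hp => by simpa using (List.mem_filter.mp hp).2)]
    -- blocks agree pointwise on the member categories
    congr 1
    apply List.flatMap_congr
    intro c hcm
    rw [hgetD c]
    have hfiles : PySem.List.sorted ((pairs.filter (fun p => p.1 == c)).map (fun p => p.2)) (fun f => f)
        = (l'.filter (fun q => q.1 == c)).map (fun q => q.2) := by
      apply PySem.List.sorted_id_eq_of_perm_of_pairwise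
      · exact (hperm.filter _).map _
      · rw [List.pairwise_map]
        have hpw : l'.Pairwise (fun a b => a.2 ≤ b.2) := PySem.List.sorted_pairwise _ _
        exact hpw.sublist List.filter_sublist
    rw [hfiles, List.map_map]
    rfl
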